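-- pv_equiv track=rewrite | github.com/bileschi/interview_questions | leetcode/problemsets/2684/py/main.py | maxMoves
-- ===== SOURCE A (Python) =====
-- from typing import List
--
-- def maxMoves(grid: List[List[int]]) -> int:
--     m = len(grid) # number of rows.  2 <= m <= 4
--     n = len(grid[0]) # number of cols.  2 <= n <= 1000
--     currentColumnIdx = 0
--     maxColumnIdx = 0
--     currentColumnReachable = [True] * m
--     while (currentColumnIdx < (n-1)) and any(currentColumnReachable):
--         nextColumnReachable = [False] * m
--         for i in range(m):
--             if currentColumnReachable[i]:
--                 for j in reversed(range(-1, 2)):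
--                     # if nextColumnReachable[i+j]: break # Short if we have already reached this cell
--                     if (i+j >= 0) and (i+j < m) and (grid[i+j][currentColumnIdx+1] > grid[i][currentColumnIdx]):
--                         nextColumnReachable[i+j] = True
--                         maxColumnIdx = currentColumnIdx+1
--         currentColumnIdx += 1
--         currentColumnReachable = nextColumnReachable
--     return maxColumnIdx
-- ===== SOURCE B (Python) =====
-- def maxMoves(grid):
--     # Backward dynamic programming: far[i] = farthest column reachable starting
--     # from cell (i, j), computed column by column from right to left.
--     m = len(grid)
--     n = len(grid[0])
--     far = [n - 1] * m
--     for j in range(n - 2, -1, -1):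
--         far = [max([j] + [far[k] for k in (i - 1, i, i + 1)
--                           if 0 <= k < m and grid[k][j + 1] > grid[i][j]])
--                for i in range(m)]
--     return max(far)
-- ===== Notes on version B (the rewrite author's own statement) =====
-- stated objective: alternative
-- what changed: A runs a forward frontier sweep (BFS over columns with a boolean reachable-rows vector and a running maxColumnIdx mutated in the inner loop); B instead does backward dynamic programming from the last column, computing for every cell the farthest column reachable from it and returning the max of that DP vector at column 0 -- no frontier, no visited state, no running answer.
-- outside the precondition, e.g. on maxMoves([[], []]): A returns 0, B returns -1; on maxMoves([[5, 1, 0], [5, 1]]): A returns 0, B raises IndexError; on maxMoves([[1, 2, 3], [9, 9]]): A raises IndexError, B raises IndexError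
import Mathlib
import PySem

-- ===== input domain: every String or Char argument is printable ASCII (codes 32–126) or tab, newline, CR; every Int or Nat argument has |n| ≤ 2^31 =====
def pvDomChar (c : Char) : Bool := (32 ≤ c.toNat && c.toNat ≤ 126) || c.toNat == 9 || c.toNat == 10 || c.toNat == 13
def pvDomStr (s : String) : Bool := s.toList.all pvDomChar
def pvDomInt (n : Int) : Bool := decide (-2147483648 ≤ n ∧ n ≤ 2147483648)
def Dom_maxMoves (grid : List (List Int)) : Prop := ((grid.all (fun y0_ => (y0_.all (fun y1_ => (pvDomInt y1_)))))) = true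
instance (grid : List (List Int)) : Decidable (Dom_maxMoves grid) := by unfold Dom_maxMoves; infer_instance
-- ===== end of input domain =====

-- B replaces A's forward frontier sweep (boolean reachable-rows vector per column plus a
-- running maxColumnIdx) by backward dynamic programming: farthest reachable column per cell,
-- computed right-to-left; the answer is the max of the DP vector at column 0. Objective: alternative.

-- shared cell access: grid[i][c]; exact under Pre_ (all accessed indices are in range there)
def pvCell (grid : List (List Int)) (i c : Nat) : Int := (grid.getD i []).getD c 0

-- ===== PORT A =====
-- one iteration of A's while-body: the two nested for-loops building nextColumnReachable
-- and updating maxColumnIdx (j runs over reversed(range(-1,2)) = [1,0,-1])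
def pvStepA (grid : List (List Int)) (m col : Nat) (cur : List Bool) (maxIdx : Int) :
    List Bool × Int :=
  (List.range m).foldl
    (fun st i =>
      if cur.getD i false then
        ([1, 0, -1] : List Int).foldl
          (fun st2 j =>
            let t : Int := (i : Int) + j
            if 0 ≤ t ∧ t < (m : Int) ∧ pvCell grid t.toNat (col + 1) > pvCell grid i col then
              (st2.1.set t.toNat true, ((col : Int) + 1))
            else st2)
          st
      else st)
    (List.replicate m false, maxIdx)

-- A's while loop (guard col < n-1 written col+1 < n, equivalent for Nat n)
def pvLoopA (grid : List (List Int)) (m n col : Nat) (maxIdx : Int) (cur : List Bool) : Int :=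
  if col + 1 < n ∧ cur.any id then
    let s := pvStepA grid m col cur maxIdx
    pvLoopA grid m n (col + 1) s.2 s.1
  else maxIdx
termination_by n - col

def maxMoves (grid : List (List Int)) : Int :=
  pvLoopA grid grid.length (grid.headD []).length 0 0 (List.replicate grid.length true)

-- ===== PORT B =====
-- Source B's per-column list comprehension:
--   [max([j] + [far[k] for k in (i-1,i,i+1) if 0<=k<m and grid[k][j+1]>grid[i][j]]) for i in range(m)]
def pvColB (grid : List (List Int)) (m j : Nat) (far : List Int) : List Int :=
  (List.range m).map (fun (i : Nat) =>
    (([(i : Int) - 1, (i : Int), (i : Int) + 1]).filterMap (fun k =>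
        if 0 ≤ k ∧ k < (m : Int) ∧ pvCell grid k.toNat (j + 1) > pvCell grid i j
        then some (far.getD k.toNat 0) else none)).foldl max ((j : Int)))

-- Source B: far = [n-1]*m; for j in range(n-2,-1,-1): far = <column update>; return max(far)
def maxMoves_alt (grid : List (List Int)) : Int :=
  let m := grid.length
  let n := (grid.headD []).length
  let far := ((List.range (n - 1)).reverse).foldl (fun far j => pvColB grid m j far)
      (List.replicate m ((n : Int) - 1))
  match far with
  | [] => 0
  | h :: t => t.foldl max h

-- ===== PRECONDITION & SPEC =====
-- Pre_ excludes: the empty grid (A raises IndexError on grid[0]); ragged grids with a row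
-- shorter than grid[0] (A usually raises IndexError there, and where it happens to return,
-- the value depends on which short entries its sweep touches — B's backward DP touches them
-- all and raises); and grids whose first row is empty (n = 0, a degenerate shape outside the
-- problem's n ≥ 2 constraints, where A's 0 and B's -1 are both accidental sentinel values).
def Pre_maxMoves (grid : List (List Int)) : Prop :=
  grid ≠ [] ∧ (grid.headD []).length ≠ 0 ∧ ∀ row ∈ grid, (grid.headD []).length ≤ row.length

instance (grid : List (List Int)) : Decidable (Pre_maxMoves grid) := by
  unfold Pre_maxMoves; infer_instance

def pvWitness_maxMoves : List (List Int) := [[1, 2, 3], [3, 1, 4], [2, 5, 1]]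

def Spec_maxMoves (grid : List (List Int)) (out : Int) : Prop := out = maxMoves_alt grid
instance (grid : List (List Int)) (out : Int) : Decidable (Spec_maxMoves grid out) := by
  unfold Spec_maxMoves; infer_instance

-- ===== CLAIM (what is proved, stated in full; the proofs are below) =====
def Claim_equal_maxMoves : Prop :=
  ∀ (grid : List (List Int)), Dom_maxMoves grid → Pre_maxMoves grid →
    Spec_maxMoves grid (maxMoves grid)

-- ===== LEMMAS AND PROOFS =====
-- Proof plan: both programs are related to an intermediate pull-style frontier loop pvLoopF.
--   (1) maxMoves = pvLoopF …                (invariant over A's boolean vectors)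
--   (2) pvLoopF … = max over the frontier of B's DP values (induction right-to-left)
--   (3) maxMoves_alt = that max at column 0 over all rows.

-- pull-style frontier: rows of column `col` reachable from frontier `rows` of column col-1
def pvNextF (grid : List (List Int)) (m col : Nat) (rows : PySem.Set Int) : PySem.Set Int :=
  PySem.Set.ofList
    (((List.range m).filter
        (fun (r : Nat) =>
          ([((r : Int) - 1), (r : Int), ((r : Int) + 1)]).any
            (fun (p : Int) =>
              decide (0 ≤ p) && decide (p < (m : Int)) && rows.contains p &&
                decide (pvCell grid r col > pvCell grid p.toNat (col - 1))))).map
      (fun (r : Nat) => (r : Int)))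

def pvLoopF (grid : List (List Int)) (m n col : Nat) (rows : PySem.Set Int) : Int :=
  if col + 1 < n ∧ rows ≠ [] then
    pvLoopF grid m n (col + 1) (pvNextF grid m (col + 1) rows)
  else if rows ≠ [] then (col : Int) else (col : Int) - 1
termination_by n - col

-- the single inner-loop step of A (body of 'for j in reversed(range(-1,2))')
def pvFA (grid : List (List Int)) (m col i : Nat) (st2 : List Bool × Int) (j : Int) :
    List Bool × Int :=
  if 0 ≤ (i : Int) + j ∧ (i : Int) + j < (m : Int) ∧
      pvCell grid ((i : Int) + j).toNat (col + 1) > pvCell grid i col then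
    (st2.1.set ((i : Int) + j).toNat true, ((col : Int) + 1))
  else st2

-- the outer-loop step of A (body of 'for i in range(m)')
def pvBodyA (grid : List (List Int)) (m col : Nat) (cur : List Bool) (st : List Bool × Int)
    (i : Nat) : List Bool × Int :=
  if cur.getD i false then ([1, 0, -1] : List Int).foldl (pvFA grid m col i) st else st

theorem pvStepA_eq (grid : List (List Int)) (m col : Nat) (cur : List Bool) (maxIdx : Int) :
    pvStepA grid m col cur maxIdx =
      (List.range m).foldl (pvBodyA grid m col cur) (List.replicate m false, maxIdx) := rfl

-- 'cell t in column col+1 is entered from cell i in column col'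
def pvD (grid : List (List Int)) (m col i t : Nat) : Prop :=
  (t : Int) - 1 ≤ (i : Int) ∧ (i : Int) ≤ (t : Int) + 1 ∧ t < m ∧
    pvCell grid t (col + 1) > pvCell grid i col

theorem getD_set_true (l : List Bool) (n t : Nat) (ht : t < l.length) :
    (l.set n true).getD t false = if n = t then true else l.getD t false := by
  simp only [List.getD_eq_getElem?_getD, List.getElem?_set]
  split_ifs with h1 h2
  · simp
  · omega
  · rfl

theorem any_id_iff (l : List Bool) :
    l.any id = true ↔ ∃ i, i < l.length ∧ l.getD i false = true := by
  simp only [List.any_eq_true, id, List.mem_iff_getElem]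
  constructor
  · rintro ⟨x, ⟨i, hi, rfl⟩, hx⟩
    exact ⟨i, hi, by simp [List.getD_eq_getElem?_getD, List.getElem?_eq_getElem hi, hx]⟩
  · rintro ⟨i, hi, h⟩
    refine ⟨l[i], ⟨i, hi, rfl⟩, ?_⟩
    simpa [List.getD_eq_getElem?_getD, List.getElem?_eq_getElem hi] using h

theorem any_set_true (l : List Bool) (n : Nat) (hn : n < l.length) :
    (l.set n true).any id = true := by
  rw [any_id_iff]
  exact ⟨n, by simpa using hn, by rw [getD_set_true _ _ _ hn]; simp⟩

theorem fA_length (grid : List (List Int)) (m col i : Nat) (st2 : List Bool × Int) (j : Int) :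
    (pvFA grid m col i st2 j).1.length = st2.1.length := by
  unfold pvFA; split <;> simp

theorem fA_getD (grid : List (List Int)) (m col i : Nat) (st2 : List Bool × Int) (j : Int)
    (t : Nat) (hlen : st2.1.length = m) (ht : t < m) :
    ((pvFA grid m col i st2 j).1.getD t false = true ↔
      st2.1.getD t false = true ∨
        ((i : Int) + j = (t : Int) ∧ t < m ∧
          pvCell grid t (col + 1) > pvCell grid i col)) := by
  unfold pvFA
  split
  · next hc =>
    obtain ⟨h0, hm, hcell⟩ := hc
    rw [getD_set_true _ _ _ (by omega : t < st2.1.length)]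
    by_cases he : ((i : Int) + j).toNat = t
    · rw [if_pos he]
      constructor
      · intro _
        refine Or.inr ⟨by omega, ht, ?_⟩
        rwa [he] at hcell
      · intro _
        rfl
    · rw [if_neg he]
      constructor
      · exact Or.inl
      · rintro (h | ⟨hij, _, _⟩)
        · exact h
        · exact absurd (by omega : ((i : Int) + j).toNat = t) he
  · next hc =>
    constructor
    · exact Or.inl
    · rintro (h | ⟨hij, htm, hcell⟩)
      · exact h
      · exfalso
        apply hc
        refine ⟨by omega, by omega, ?_⟩
        rwa [show ((i : Int) + j).toNat = t by omega]

theorem bodyA_length (grid : List (List Int)) (m col : Nat) (cur : List Bool)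
    (st : List Bool × Int) (i : Nat) :
    (pvBodyA grid m col cur st i).1.length = st.1.length := by
  unfold pvBodyA
  split
  · simp only [List.foldl_cons, List.foldl_nil, fA_length]
  · rfl

theorem bodyA_getD (grid : List (List Int)) (m col : Nat) (cur : List Bool)
    (st : List Bool × Int) (i : Nat) (t : Nat) (hlen : st.1.length = m) (ht : t < m) :
    ((pvBodyA grid m col cur st i).1.getD t false = true ↔
      st.1.getD t false = true ∨ (cur.getD i false = true ∧ pvD grid m col i t)) := by
  unfold pvBodyA
  split
  · next hcur =>
    simp only [List.foldl_cons, List.foldl_nil]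
    rw [fA_getD _ _ _ _ _ _ _ (by simp [fA_length, hlen]) ht,
        fA_getD _ _ _ _ _ _ _ (by simp [fA_length, hlen]) ht,
        fA_getD _ _ _ _ _ _ _ hlen ht]
    unfold pvD
    constructor
    · rintro (((h | ⟨h1, h2, h3⟩) | ⟨h1, h2, h3⟩) | ⟨h1, h2, h3⟩)
      · exact Or.inl h
      · exact Or.inr ⟨hcur, by omega, by omega, h2, h3⟩
      · exact Or.inr ⟨hcur, by omega, by omega, h2, h3⟩
      · exact Or.inr ⟨hcur, by omega, by omega, h2, h3⟩
    · rintro (h | ⟨-, h1, h2, h3, h4⟩)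
      · exact Or.inl (Or.inl (Or.inl h))
      · by_cases hj : (i : Int) + 1 = (t : Int)
        · exact Or.inl (Or.inl (Or.inr ⟨hj, h3, h4⟩))
        · by_cases hj0 : (i : Int) = (t : Int)
          · exact Or.inl (Or.inr ⟨by omega, h3, h4⟩)
          · exact Or.inr ⟨by omega, h3, h4⟩
  · next hcur =>
    simp only [Bool.not_eq_true] at hcur
    rw [hcur]
    simp

-- state invariant for A's outer fold: length preserved, and snd tracks whether any cell was set
def pvQ (m : Nat) (col : Nat) (maxIdx : Int) (st : List Bool × Int) : Prop :=
  st.1.length = m ∧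
    ((st.1.any id = false ∧ st.2 = maxIdx) ∨ (st.1.any id = true ∧ st.2 = (col : Int) + 1))

theorem pvQ_foldA (grid : List (List Int)) (m col : Nat) (cur : List Bool) (maxIdx : Int)
    (L : List Nat) (st : List Bool × Int) (h : pvQ m col maxIdx st) :
    pvQ m col maxIdx (L.foldl (pvBodyA grid m col cur) st) := by
  induction L generalizing st with
  | nil => exact h
  | cons i L ih =>
    refine ih _ ?_
    unfold pvBodyA
    split
    · simp only [List.foldl_cons, List.foldl_nil]
      have step : ∀ (st2 : List Bool × Int) (j : Int), pvQ m col maxIdx st2 →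
          pvQ m col maxIdx (pvFA grid m col i st2 j) := by
        rintro st2 j ⟨hl, hq⟩
        unfold pvFA
        split
        · next hc =>
          refine ⟨by simp [hl], Or.inr ⟨?_, rfl⟩⟩
          exact any_set_true _ _ (by omega)
        · exact ⟨hl, hq⟩
      exact step _ _ (step _ _ (step _ _ h))
    · exact h

theorem foldA_fst (grid : List (List Int)) (m col : Nat) (cur : List Bool)
    (L : List Nat) (st : List Bool × Int) (hlen : st.1.length = m) (t : Nat) (ht : t < m) :
    ((L.foldl (pvBodyA grid m col cur) st).1.getD t false = true ↔
      st.1.getD t false = true ∨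
        ∃ i ∈ L, cur.getD i false = true ∧ pvD grid m col i t) := by
  induction L generalizing st with
  | nil => simp
  | cons i L ih =>
    simp only [List.foldl_cons]
    rw [ih _ (by rw [bodyA_length, hlen]), bodyA_getD _ _ _ _ _ _ _ hlen ht]
    simp only [List.mem_cons]
    constructor
    · rintro ((h | h) | ⟨i', hi', h⟩)
      · exact Or.inl h
      · exact Or.inr ⟨i, Or.inl rfl, h⟩
      · exact Or.inr ⟨i', Or.inr hi', h⟩
    · rintro (h | ⟨i', (rfl | hi'), h⟩)
      · exact Or.inl (Or.inl h)
      · exact Or.inl (Or.inr h)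
      · exact Or.inr ⟨i', hi', h⟩

theorem nextF_mem (grid : List (List Int)) (m col : Nat) (rows : PySem.Set Int) (x : Int) :
    x ∈ pvNextF grid m col rows ↔
      ∃ r : Nat, r < m ∧ x = (r : Int) ∧
        ∃ p : Int, ((r : Int) - 1 ≤ p ∧ p ≤ (r : Int) + 1) ∧ 0 ≤ p ∧ p < (m : Int) ∧
          p ∈ rows ∧ pvCell grid r col > pvCell grid p.toNat (col - 1) := by
  rw [pvNextF, PySem.Set.mem_ofList, List.mem_map]
  constructor
  · rintro ⟨r, hmem, rfl⟩
    rw [List.mem_filter, List.mem_range] at hmem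
    obtain ⟨hr, hpred⟩ := hmem
    rw [List.any_eq_true] at hpred
    obtain ⟨p, hp, hcond⟩ := hpred
    simp only [Bool.and_eq_true, decide_eq_true_eq, PySem.Set.contains_iff] at hcond
    obtain ⟨⟨⟨h0, hm⟩, hmemr⟩, hcell⟩ := hcond
    simp only [List.mem_cons, List.not_mem_nil, or_false] at hp
    exact ⟨r, hr, rfl, p, by omega, h0, hm, hmemr, hcell⟩
  · rintro ⟨r, hr, rfl, p, ⟨hp1, hp2⟩, h0, hm, hmemr, hcell⟩
    refine ⟨r, ?_, rfl⟩
    rw [List.mem_filter, List.mem_range]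
    refine ⟨hr, ?_⟩
    rw [List.any_eq_true]
    refine ⟨p, ?_, ?_⟩
    · simp only [List.mem_cons, List.not_mem_nil, or_false]
      omega
    · simp only [Bool.and_eq_true, decide_eq_true_eq, PySem.Set.contains_iff]
      exact ⟨⟨⟨h0, hm⟩, hmemr⟩, hcell⟩

-- (1) A's loop equals the pull-style frontier loop
theorem loop_eq (grid : List (List Int)) (m n : Nat) (k col : Nat) (hk : n - col ≤ k)
    (cur : List Bool) (rows : PySem.Set Int) (maxIdx : Int)
    (hlen : cur.length = m)
    (hmem : ∀ i : Nat, i < m → (cur.getD i false = true ↔ (i : Int) ∈ rows))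
    (hshape : ∀ p ∈ rows, ∃ i : Nat, i < m ∧ p = (i : Int))
    (hmax : maxIdx = (if cur.any id then (col : Int) else (col : Int) - 1)) :
    pvLoopA grid m n col maxIdx cur = pvLoopF grid m n col rows := by
  induction k generalizing col cur rows maxIdx with
  | zero =>
    rw [pvLoopA, pvLoopF]
    have hng : ¬ (col + 1 < n) := by omega
    rw [if_neg (by tauto), if_neg (by tauto)]
    rcases eq_or_ne rows ([] : List Int) with hr | hr
    · have hany : cur.any id = false := by
        rw [Bool.eq_false_iff]
        intro hA
        obtain ⟨i, hi, hgi⟩ := (any_id_iff cur).mp hA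
        rw [hlen] at hi
        exact absurd ((hmem i hi).mp hgi) (by simp [hr])
      rw [if_neg (by simpa using hr)]
      rw [hmax, hany]
      simp
    · have hany : cur.any id = true := by
        obtain ⟨p, hp⟩ := List.exists_mem_of_ne_nil rows hr
        obtain ⟨i, hi, rfl⟩ := hshape p hp
        exact (any_id_iff cur).mpr ⟨i, by omega, (hmem i hi).mpr hp⟩
      rw [if_pos hr, hmax, hany]
      simp
  | succ k ih =>
    have hany : cur.any id = true ↔ rows ≠ [] := by
      constructor
      · intro hA
        obtain ⟨i, hi, hgi⟩ := (any_id_iff cur).mp hA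
        rw [hlen] at hi
        exact List.ne_nil_of_mem ((hmem i hi).mp hgi)
      · intro hr
        obtain ⟨p, hp⟩ := List.exists_mem_of_ne_nil rows hr
        obtain ⟨i, hi, rfl⟩ := hshape p hp
        exact (any_id_iff cur).mpr ⟨i, by omega, (hmem i hi).mpr hp⟩
    by_cases hg : col + 1 < n ∧ cur.any id = true
    · rw [pvLoopA, if_pos hg, pvLoopF, if_pos ⟨hg.1, hany.mp hg.2⟩]
      have hQ : pvQ m col maxIdx (pvStepA grid m col cur maxIdx) := by
        rw [pvStepA_eq]
        exact pvQ_foldA grid m col cur maxIdx _ _ ⟨by simp, Or.inl ⟨by simp, rfl⟩⟩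
      have hlen' : (pvStepA grid m col cur maxIdx).1.length = m := hQ.1
      have hmem' : ∀ t : Nat, t < m →
          ((pvStepA grid m col cur maxIdx).1.getD t false = true ↔
            (t : Int) ∈ pvNextF grid m (col + 1) rows) := by
        intro t ht
        rw [pvStepA_eq, foldA_fst grid m col cur _ _ (by simp) t ht,
          nextF_mem grid m (col + 1) rows]
        constructor
        · rintro (hrep | ⟨i, hiL, hci, hD⟩)
          · simp at hrep
          · rw [List.mem_range] at hiL
            obtain ⟨hd1, hd2, hd3, hd4⟩ := hD
            refine ⟨t, hd3, rfl, (i : Int), ⟨hd1, hd2⟩, by omega, by omega,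
              (hmem i hiL).mp hci, ?_⟩
            simpa using hd4
        · rintro ⟨r, hr, hrt, p, ⟨hp1, hp2⟩, h0, hm, hmemr, hcell⟩
          have hrt' : r = t := by omega
          subst hrt'
          refine Or.inr ⟨p.toNat, List.mem_range.mpr (by omega), ?_, ?_⟩
          · exact (hmem p.toNat (by omega)).mpr (by rwa [show ((p.toNat : Nat) : Int) = p by omega])
          · refine ⟨by omega, by omega, hr, ?_⟩
            simpa using hcell
      have hshape' : ∀ p ∈ pvNextF grid m (col + 1) rows,
          ∃ i : Nat, i < m ∧ p = (i : Int) := by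
        intro p hp
        obtain ⟨r, hr, rfl, -⟩ := (nextF_mem grid m (col + 1) rows p).mp hp
        exact ⟨r, hr, rfl⟩
      have hmax' : (pvStepA grid m col cur maxIdx).2 =
          (if (pvStepA grid m col cur maxIdx).1.any id then ((col + 1 : Nat) : Int)
            else ((col + 1 : Nat) : Int) - 1) := by
        rcases hQ.2 with ⟨ha, hv⟩ | ⟨ha, hv⟩
        · rw [ha, hv, if_neg (by simp), hmax, hg.2]
          simp
        · rw [ha, hv, if_pos rfl]
          push_cast
          ring
      show pvLoopA grid m n (col + 1) (pvStepA grid m col cur maxIdx).2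
          (pvStepA grid m col cur maxIdx).1 = _
      exact ih (col + 1) (by omega) (pvStepA grid m col cur maxIdx).1
        (pvNextF grid m (col + 1) rows) (pvStepA grid m col cur maxIdx).2
        hlen' hmem' hshape' hmax'
    · rw [pvLoopA, if_neg hg, pvLoopF, if_neg (by
        rintro ⟨h1, h2⟩
        exact hg ⟨h1, hany.mpr h2⟩)]
      rcases eq_or_ne rows ([] : List Int) with hr | hr
      · have : cur.any id = false := by
          rw [Bool.eq_false_iff]
          intro hA
          exact (hany.mp hA) hr
        rw [if_neg (by simpa using hr), hmax, this]
        simp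
      · rw [if_pos hr, hmax, hany.mpr hr]
        simp

-- ===== B-side semantics: the backward DP vector =====
def pvFar (grid : List (List Int)) (m n j : Nat) : List Int :=
  if j + 1 < n then pvColB grid m j (pvFar grid m n (j + 1))
  else List.replicate m ((n : Int) - 1)
termination_by n - j

theorem colB_length (grid : List (List Int)) (m j : Nat) (far : List Int) :
    (pvColB grid m j far).length = m := by
  simp [pvColB]

theorem far_length (grid : List (List Int)) (m n j : Nat) :
    (pvFar grid m n j).length = m := by
  rw [pvFar]
  split
  · exact colB_length _ _ _ _
  · simp

-- fold-max basics
theorem le_foldl_max (l : List Int) (a : Int) : a ≤ l.foldl max a := by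
  induction l generalizing a with
  | nil => simp
  | cons x l ih => exact le_trans (le_max_left a x) (ih (max a x))

theorem mem_le_foldl_max (l : List Int) : ∀ (a x : Int), x ∈ l → x ≤ l.foldl max a := by
  induction l with
  | nil => intro a x hx; simp at hx
  | cons y l ih =>
    intro a x hx
    rcases List.mem_cons.mp hx with rfl | hx
    · exact le_trans (le_max_right a x) (le_foldl_max l (max a x))
    · exact ih (max a y) x hx

theorem foldl_max_mem (l : List Int) (a : Int) : l.foldl max a = a ∨ l.foldl max a ∈ l := by
  induction l generalizing a with
  | nil => simp
  | cons x l ih =>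
    rcases ih (max a x) with h | h
    · rcases max_cases a x with ⟨he, -⟩ | ⟨he, -⟩
      · exact Or.inl (by simpa [he] using h)
      · exact Or.inr (List.mem_cons.mpr (Or.inl (by simpa [he] using h)))
    · exact Or.inr (List.mem_cons.mpr (Or.inr h))

-- the i-th entry of pvColB
theorem colB_getD (grid : List (List Int)) (m j : Nat) (far : List Int) (i : Nat)
    (hi : i < m) :
    (pvColB grid m j far).getD i 0 =
      (([(i : Int) - 1, (i : Int), (i : Int) + 1]).filterMap (fun k =>
        if 0 ≤ k ∧ k < (m : Int) ∧ pvCell grid k.toNat (j + 1) > pvCell grid i j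
        then some (far.getD k.toNat 0) else none)).foldl max ((j : Int)) := by
  unfold pvColB
  rw [List.getD_eq_getElem?_getD, List.getElem?_map]
  rw [List.getElem?_range hi]
  simp

-- F i j : farthest column reachable from (i, j), as computed by B
def pvFv (grid : List (List Int)) (m n i j : Nat) : Int := (pvFar grid m n j).getD i 0

theorem Fv_ge (grid : List (List Int)) (m n i j : Nat) (hi : i < m) (hj : j + 1 ≤ n) :
    (j : Int) ≤ pvFv grid m n i j := by
  unfold pvFv
  rw [pvFar]
  split
  · rw [colB_getD _ _ _ _ _ hi]
    exact le_foldl_max _ _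
  · next h =>
    have : j + 1 = n := by omega
    simp [List.getD_eq_getElem?_getD, hi]
    omega

-- membership in pvColB's candidate list
theorem cands_mem (grid : List (List Int)) (m j : Nat) (far : List Int) (i : Nat) (x : Int) :
    (x ∈ ([(i : Int) - 1, (i : Int), (i : Int) + 1]).filterMap (fun k =>
        if 0 ≤ k ∧ k < (m : Int) ∧ pvCell grid k.toNat (j + 1) > pvCell grid i j
        then some (far.getD k.toNat 0) else none) ↔
      ∃ k : Int, ((i : Int) - 1 ≤ k ∧ k ≤ (i : Int) + 1) ∧ 0 ≤ k ∧ k < (m : Int) ∧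
        pvCell grid k.toNat (j + 1) > pvCell grid i j ∧ x = far.getD k.toNat 0) := by
  rw [List.mem_filterMap]
  constructor
  · rintro ⟨k, hk, hsome⟩
    simp only [List.mem_cons, List.not_mem_nil, or_false] at hk
    split at hsome
    · next hc =>
      obtain ⟨h0, hm, hcell⟩ := hc
      refine ⟨k, by omega, h0, hm, hcell, by injection hsome with h; exact h.symm⟩
    · exact absurd hsome (by simp)
  · rintro ⟨k, ⟨hk1, hk2⟩, h0, hm, hcell, rfl⟩
    refine ⟨k, ?_, ?_⟩
    · simp only [List.mem_cons, List.not_mem_nil, or_false]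
      omega
    · rw [if_pos ⟨h0, hm, hcell⟩]

-- (2) the frontier loop computes the max of B's DP values over the frontier
theorem loopF_max (grid : List (List Int)) (m n : Nat) (fuel : Nat) :
    ∀ (c : Nat), n - c ≤ fuel → c + 1 ≤ n →
    ∀ (rows : PySem.Set Int), rows ≠ [] →
      (∀ p ∈ rows, ∃ i : Nat, i < m ∧ p = (i : Int)) →
      (∀ p ∈ rows, pvFv grid m n p.toNat c ≤ pvLoopF grid m n c rows) ∧
        (∃ p ∈ rows, pvFv grid m n p.toNat c = pvLoopF grid m n c rows) := by
  induction fuel with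
  | zero => intro c hk hc rows hr hshape; omega
  | succ fuel ih =>
    intro c hk hc rows hr hshape
    by_cases hg : c + 1 < n
    · rw [pvLoopF, if_pos ⟨hg, hr⟩]
      set R' := pvNextF grid m (c + 1) rows with hR'
      -- valid moves out of the frontier land in R'
      have hmove : ∀ p ∈ rows, ∀ k : Int, ((p : Int) - 1 ≤ k ∧ k ≤ p + 1) → 0 ≤ k →
          k < (m : Int) → pvCell grid k.toNat (c + 1) > pvCell grid p.toNat c → k ∈ R' := by
        intro p hp k hk1 h0 hm hcell
        obtain ⟨i, him, rfl⟩ := hshape p hp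
        rw [hR', nextF_mem]
        refine ⟨k.toNat, by omega, by omega, (i : Int), by omega, by positivity, by omega, hp, ?_⟩
        simpa using hcell
      -- entries at column c unfold to the max over candidates
      have hentry : ∀ p ∈ rows, pvFv grid m n p.toNat c =
          (([(p.toNat : Int) - 1, (p.toNat : Int), (p.toNat : Int) + 1]).filterMap (fun k =>
            if 0 ≤ k ∧ k < (m : Int) ∧ pvCell grid k.toNat (c + 1) > pvCell grid p.toNat c
            then some ((pvFar grid m n (c + 1)).getD k.toNat 0) else none)).foldl max
            ((c : Int)) := by
        intro p hp
        obtain ⟨i, him, rfl⟩ := hshape p hp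
        unfold pvFv
        simp only [Int.toNat_natCast]
        rw [pvFar, if_pos hg, colB_getD _ _ _ _ _ him]
        rfl
      rcases eq_or_ne R' ([] : List Int) with hRe | hRe
      · -- no moves at all: every frontier entry is exactly c, and the loop returns c
        have hloop : pvLoopF grid m n (c + 1) R' = (c : Int) := by
          rw [pvLoopF, hRe]
          simp
        rw [hloop]
        have hval : ∀ p ∈ rows, pvFv grid m n p.toNat c = (c : Int) := by
          intro p hp
          rw [hentry p hp]
          have : (([(p.toNat : Int) - 1, (p.toNat : Int), (p.toNat : Int) + 1]).filterMap
              (fun k => if 0 ≤ k ∧ k < (m : Int) ∧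
                  pvCell grid k.toNat (c + 1) > pvCell grid p.toNat c
                then some ((pvFar grid m n (c + 1)).getD k.toNat 0) else none)) = [] := by
            rw [List.eq_nil_iff_forall_not_mem]
            intro x hx
            obtain ⟨k, hk1, h0, hm, hcell, -⟩ := (cands_mem _ _ _ _ _ _).mp hx
            obtain ⟨i, him, hpi⟩ := hshape p hp
            have : k ∈ R' := by
              refine hmove p hp k ?_ h0 hm ?_
              · omega
              · exact hcell
            rw [hRe] at this
            simp at this
          rw [this]
          simp
        constructor
        · intro p hp; rw [hval p hp]
        · obtain ⟨p, hp⟩ := List.exists_mem_of_ne_nil rows hr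
          exact ⟨p, hp, hval p hp⟩
      · -- recurse
        have hshape' : ∀ p ∈ R', ∃ i : Nat, i < m ∧ p = (i : Int) := by
          intro p hp
          obtain ⟨r, hrm, rfl, -⟩ := (nextF_mem grid m (c + 1) rows p).mp hp
          exact ⟨r, hrm, rfl⟩
        obtain ⟨hall, q, hq, hqeq⟩ := ih (c + 1) (by omega) (by omega) R' hRe hshape'
        set L := pvLoopF grid m n (c + 1) R' with hL
        have hcL : (c : Int) < L := by
          have h1 := Fv_ge grid m n q.toNat (c + 1) (by obtain ⟨i, hi, rfl⟩ := hshape' q hq; simpa using hi) (by omega)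
          rw [hqeq] at h1
          push_cast at h1 ⊢
          omega
        constructor
        · intro p hp
          rw [hentry p hp]
          rcases foldl_max_mem (([(p.toNat : Int) - 1, (p.toNat : Int), (p.toNat : Int) + 1]).filterMap
              (fun k => if 0 ≤ k ∧ k < (m : Int) ∧
                  pvCell grid k.toNat (c + 1) > pvCell grid p.toNat c
                then some ((pvFar grid m n (c + 1)).getD k.toNat 0) else none)) ((c : Int)) with
            he | he
          · rw [he]; omega
          · obtain ⟨k, hk1, h0, hm, hcell, hxv⟩ := (cands_mem _ _ _ _ _ _).mp he
            have hkR : k ∈ R' := by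
              refine hmove p hp k ?_ h0 hm hcell
              obtain ⟨i, him, hpi⟩ := hshape p hp
              omega
            have := hall k hkR
            rw [hxv]
            exact this
        · -- find a predecessor of the maximising row
          obtain ⟨r, hrm, hqr, p, ⟨hp1, hp2⟩, h0, hpm, hpR, hcell⟩ :=
            (nextF_mem grid m (c + 1) rows q).mp hq
          refine ⟨p, hpR, le_antisymm ?_ ?_⟩
          · -- F p c ≤ L : same as the ∀ part
            rw [hentry p hpR]
            rcases foldl_max_mem (([(p.toNat : Int) - 1, (p.toNat : Int), (p.toNat : Int) + 1]).filterMap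
                (fun k => if 0 ≤ k ∧ k < (m : Int) ∧
                    pvCell grid k.toNat (c + 1) > pvCell grid p.toNat c
                  then some ((pvFar grid m n (c + 1)).getD k.toNat 0) else none)) ((c : Int)) with
              he | he
            · rw [he]; omega
            · obtain ⟨k, hk1, hk0, hkm, hkcell, hxv⟩ := (cands_mem _ _ _ _ _ _).mp he
              have hkR : k ∈ R' := hmove p hpR k (by omega) hk0 hkm hkcell
              rw [hxv]
              exact hall k hkR
          · -- L ≤ F p c : q is a candidate of p's entry
            rw [hentry p hpR, ← hqeq]
            refine mem_le_foldl_max _ _ _ ?_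
            rw [cands_mem]
            refine ⟨q, ?_, by omega, by omega, ?_, ?_⟩
            · omega
            · rw [hqr]
              simpa using hcell
            · unfold pvFv
              rw [hqr]
    · -- c = n - 1: loop stops; every DP entry is n-1
      have hcn : c + 1 = n := by omega
      rw [pvLoopF, if_neg (by tauto), if_pos hr]
      have hval : ∀ p ∈ rows, pvFv grid m n p.toNat c = (c : Int) := by
        intro p hp
        obtain ⟨i, him, rfl⟩ := hshape p hp
        unfold pvFv
        rw [pvFar, if_neg (by omega)]
        simp [List.getD_eq_getElem?_getD, him]
        omega
      refine ⟨fun p hp => le_of_eq (hval p hp), ?_⟩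
      obtain ⟨p, hp⟩ := List.exists_mem_of_ne_nil rows hr
      exact ⟨p, hp, hval p hp⟩

-- (3) B's reversed-range fold computes pvFar … 0
theorem foldB_eq (grid : List (List Int)) (m n : Nat) (hn : 1 ≤ n) :
    ∀ t : Nat, t ≤ n - 1 →
      ((List.range t).reverse).foldl (fun far j => pvColB grid m j far)
        (pvFar grid m n t) = pvFar grid m n 0 := by
  intro t
  induction t with
  | zero => intro _; simp
  | succ t ih =>
    intro ht
    rw [List.range_succ, List.reverse_append]
    simp only [List.reverse_cons, List.reverse_nil, List.nil_append, List.cons_append,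
      List.foldl_cons]
    have hstep : pvColB grid m t (pvFar grid m n (t + 1)) = pvFar grid m n t := by
      conv_rhs => rw [pvFar]
      rw [if_pos (by omega)]
    rw [hstep]
    exact ih (by omega)

-- ===== VERDICT (by name: the statement is the Claim_ definition above) =====
theorem maxMoves_spec : Claim_equal_maxMoves := by
  intro grid _ hpre
  obtain ⟨hne, hn0, -⟩ := hpre
  simp only [Spec_maxMoves, maxMoves, maxMoves_alt]
  have hm : 0 < grid.length := List.length_pos_iff.mpr hne
  set m := grid.length with hmdef
  set n := (grid.headD []).length with hndef
  have hn : 1 ≤ n := by omega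
  set S0 : PySem.Set Int := PySem.Set.ofList ((List.range m).map (fun (i : Nat) => (i : Int)))
    with hS0
  -- step (1): A's result is the frontier loop's result
  have hA : pvLoopA grid m n 0 0 (List.replicate m true) = pvLoopF grid m n 0 S0 := by
    refine loop_eq grid m n n 0 (by omega) (List.replicate m true) S0 0 (by simp) ?_ ?_ ?_
    · intro i hi
      constructor
      · intro _
        rw [hS0, PySem.Set.mem_ofList, List.mem_map]
        exact ⟨i, List.mem_range.mpr hi, rfl⟩
      · intro _
        simp [List.getD_eq_getElem?_getD, hi]
    · intro p hp
      rw [hS0, PySem.Set.mem_ofList, List.mem_map] at hp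
      obtain ⟨i, hi, rfl⟩ := hp
      exact ⟨i, List.mem_range.mp hi, rfl⟩
    · have hA0 : (List.replicate m true).any id = true :=
        (any_id_iff _).mpr ⟨0, by simpa using hm,
          by simp [List.getD_eq_getElem?_getD, hm]⟩
      rw [hA0]
      simp
  rw [hA]
  -- step (3): B's fold builds pvFar … 0
  have hinit : pvFar grid m n (n - 1) = List.replicate m ((n : Int) - 1) := by
    rw [pvFar, if_neg (by omega)]
  have hfold : ((List.range (n - 1)).reverse).foldl (fun far j => pvColB grid m j far)
      (List.replicate m ((n : Int) - 1)) = pvFar grid m n 0 := by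
    rw [← hinit]
    exact foldB_eq grid m n hn (n - 1) le_rfl
  rw [hfold]
  -- step (2): the frontier loop is the max of pvFar … 0
  have hS0ne : S0 ≠ [] := by
    have : ((0 : Nat) : Int) ∈ S0 := by
      rw [hS0, PySem.Set.mem_ofList, List.mem_map]
      exact ⟨0, List.mem_range.mpr hm, rfl⟩
    exact List.ne_nil_of_mem this
  have hS0shape : ∀ p ∈ S0, ∃ i : Nat, i < m ∧ p = (i : Int) := by
    intro p hp
    rw [hS0, PySem.Set.mem_ofList, List.mem_map] at hp
    obtain ⟨i, hi, rfl⟩ := hp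
    exact ⟨i, List.mem_range.mp hi, rfl⟩
  have hS0mem : ∀ i : Nat, i < m → (i : Int) ∈ S0 := by
    intro i hi
    rw [hS0, PySem.Set.mem_ofList, List.mem_map]
    exact ⟨i, List.mem_range.mpr hi, rfl⟩
  obtain ⟨hall, q, hq, hqeq⟩ :=
    loopF_max grid m n n 0 (by omega) (by omega) S0 hS0ne hS0shape
  -- unpack B's final max(far)
  have hfarlen : (pvFar grid m n 0).length = m := far_length grid m n 0
  obtain ⟨h, t, hht⟩ : ∃ h t, pvFar grid m n 0 = h :: t := by
    cases hf : pvFar grid m n 0 with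
    | nil => rw [hf] at hfarlen; simp at hfarlen; omega
    | cons h t => exact ⟨h, t, rfl⟩
  rw [hht]
  show pvLoopF grid m n 0 S0 = t.foldl max h
  -- the fold-max of far equals the loop's result, by antisymmetry
  have hmemval : ∀ x ∈ pvFar grid m n 0, ∃ i : Nat, i < m ∧ x = pvFv grid m n i 0 := by
    intro x hx
    rw [List.mem_iff_getElem] at hx
    obtain ⟨i, hi, rfl⟩ := hx
    rw [hfarlen] at hi
    refine ⟨i, hi, ?_⟩
    unfold pvFv
    simp [List.getD_eq_getElem?_getD, hfarlen, hi]
  refine le_antisymm ?_ ?_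
  · -- loop ≤ fold-max: the attaining value is an entry of far
    obtain ⟨i, him, rfl⟩ := hS0shape q hq
    rw [← hqeq]
    have : pvFv grid m n (↑i : Int).toNat 0 ∈ pvFar grid m n 0 := by
      unfold pvFv
      have hi' : ((↑i : Int).toNat) < (pvFar grid m n 0).length := by
        rw [hfarlen]; simpa using him
      rw [List.getD_eq_getElem?_getD, List.getElem?_eq_getElem hi']
      simp [List.mem_iff_getElem]
      exact ⟨(↑i : Int).toNat, hi', rfl⟩
    rw [hht] at this
    rcases List.mem_cons.mp this with he | he
    · rw [he]
      exact le_foldl_max t h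
    · exact mem_le_foldl_max t h _ he
  · -- fold-max ≤ loop: the fold-max is an entry of far, hence a DP value of a frontier row
    have hfm : t.foldl max h ∈ pvFar grid m n 0 := by
      rw [hht]
      rcases foldl_max_mem t h with he | he
      · rw [he]; exact List.mem_cons_self
      · exact List.mem_cons.mpr (Or.inr he)
    obtain ⟨i, him, hie⟩ := hmemval _ hfm
    rw [hie]
    have := hall (i : Int) (hS0mem i him)
    simpa using this
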